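-- pv_equiv track=rewrite | github.com/erfanzar/Xerxes-Agents | examples/cortex_deepsearch_agent.py | build_research_tracks
-- ===== SOURCE A (Python) =====
-- TRACK_LIBRARY = [
--     {
--         "name": "landscape-overview",
--         "focus": "Map the space, define the topic clearly, and identify the main actors, categories, and terminology.",
--     },
--     {
--         "name": "recent-developments",
--         "focus": "Focus on recent launches, announcements, upgrades, funding, or major shifts tied to the topic.",
--     },
--     {
--         "name": "primary-sources",
--         "focus": (
--             "Prioritize official docs, company blogs, source repos, product pages, papers, or first-party statements."
--         ),
--     },
--     {
--         "name": "benchmarks-and-data",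
--         "focus": "Look for quantitative evidence, evaluations, benchmarks, datasets, or measurable adoption signals.",
--     },
--     {
--         "name": "open-source-ecosystem",
--         "focus": (
--             "Investigate open-source projects, libraries, integrations, and implementation patterns around the topic."
--         ),
--     },
--     {
--         "name": "real-world-adoption",
--         "focus": "Find case studies, production usage reports, customer stories, or practitioner writeups.",
--     },
--     {
--         "name": "risks-and-limitations",
--         "focus": "Surface failure modes, critiques, security issues, tradeoffs, limitations, or contested claims.",
--     },
--     {
--         "name": "future-direction",
--         "focus": "Look for roadmaps, open problems, strategic implications, and likely next-step developments.",
--     },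
--     {
--         "name": "competitive-landscape",
--         "focus": "Compare notable vendors, products, approaches, or competing schools of thought.",
--     },
--     {
--         "name": "regulation-and-governance",
--         "focus": "Search for policy, compliance, regulatory, or governance angles where relevant.",
--     },
--     {
--         "name": "academic-research",
--         "focus": "Search for papers, technical reports, and research-oriented discussion around the topic.",
--     },
--     {
--         "name": "community-signal",
--         "focus": "Look for practitioner commentary, community experiments, or reported implementation experience.",
--     },
-- ]
--
-- def build_research_tracks(parallel_researchers: int) -> list[dict[str, str]]:
--     """Select or extend research tracks for parallel workers."""
--     tracks = []
--     for index in range(parallel_researchers):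
--         template = TRACK_LIBRARY[index % len(TRACK_LIBRARY)]
--         cycle = index // len(TRACK_LIBRARY)
--         if cycle == 0:
--             tracks.append(template)
--         else:
--             tracks.append(
--                 {
--                     "name": f"{template['name']}-pass-{cycle + 1}",
--                     "focus": (
--                         template["focus"] + " Search for different sources and a different angle than earlier passes."
--                     ),
--                 }
--             )
--     return tracks
-- ===== SOURCE B (Python) =====
-- TRACK_LIBRARY = [
--     {
--         "name": "landscape-overview",
--         "focus": "Map the space, define the topic clearly, and identify the main actors, categories, and terminology.",
--     },
--     {
--         "name": "recent-developments",
--         "focus": "Focus on recent launches, announcements, upgrades, funding, or major shifts tied to the topic.",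
--     },
--     {
--         "name": "primary-sources",
--         "focus": (
--             "Prioritize official docs, company blogs, source repos, product pages, papers, or first-party statements."
--         ),
--     },
--     {
--         "name": "benchmarks-and-data",
--         "focus": "Look for quantitative evidence, evaluations, benchmarks, datasets, or measurable adoption signals.",
--     },
--     {
--         "name": "open-source-ecosystem",
--         "focus": (
--             "Investigate open-source projects, libraries, integrations, and implementation patterns around the topic."
--         ),
--     },
--     {
--         "name": "real-world-adoption",
--         "focus": "Find case studies, production usage reports, customer stories, or practitioner writeups.",
--     },
--     {
--         "name": "risks-and-limitations",
--         "focus": "Surface failure modes, critiques, security issues, tradeoffs, limitations, or contested claims.",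
--     },
--     {
--         "name": "future-direction",
--         "focus": "Look for roadmaps, open problems, strategic implications, and likely next-step developments.",
--     },
--     {
--         "name": "competitive-landscape",
--         "focus": "Compare notable vendors, products, approaches, or competing schools of thought.",
--     },
--     {
--         "name": "regulation-and-governance",
--         "focus": "Search for policy, compliance, regulatory, or governance angles where relevant.",
--     },
--     {
--         "name": "academic-research",
--         "focus": "Search for papers, technical reports, and research-oriented discussion around the topic.",
--     },
--     {
--         "name": "community-signal",
--         "focus": "Look for practitioner commentary, community experiments, or reported implementation experience.",
--     },
-- ]
--
-- _EXTRA = " Search for different sources and a different angle than earlier passes."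
--
--
-- def _decorated_cycle(pass_number):
--     """A full extra cycle: every template re-labelled for the given pass."""
--     return [
--         {k: (v + _EXTRA if k == "focus" else v + "-pass-" + str(pass_number)) for k, v in template.items()}
--         for template in TRACK_LIBRARY
--     ]
--
--
-- def build_research_tracks(parallel_researchers: int) -> list[dict[str, str]]:
--     """Build whole cycle blocks (the library itself, then decorated copies) and truncate."""
--     if parallel_researchers <= 0:
--         return []
--     cycles = -(-parallel_researchers // len(TRACK_LIBRARY))
--     blocks = [TRACK_LIBRARY] + [_decorated_cycle(c) for c in range(2, cycles + 1)]
--     return [track for block in blocks for track in block][:parallel_researchers]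
-- ===== Notes on version B (the rewrite author's own statement) =====
-- stated objective: alternative
-- what changed: Replaced A's flat index loop, which computes index % len and index // len and decorates one entry at a time, by staged block construction: compute the number of cycles once with ceiling division, build the library block plus one fully decorated block per extra cycle (decorating via a dict comprehension over the items), flatten, and truncate with a slice.
import Mathlib
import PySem

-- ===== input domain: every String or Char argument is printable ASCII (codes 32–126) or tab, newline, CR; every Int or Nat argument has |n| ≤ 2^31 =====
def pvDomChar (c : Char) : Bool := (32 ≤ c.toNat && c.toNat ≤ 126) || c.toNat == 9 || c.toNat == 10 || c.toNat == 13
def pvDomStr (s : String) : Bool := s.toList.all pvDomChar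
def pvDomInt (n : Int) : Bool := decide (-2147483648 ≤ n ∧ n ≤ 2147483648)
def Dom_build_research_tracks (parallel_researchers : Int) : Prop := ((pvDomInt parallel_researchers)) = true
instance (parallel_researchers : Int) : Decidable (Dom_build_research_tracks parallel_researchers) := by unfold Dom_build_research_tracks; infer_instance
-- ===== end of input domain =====

-- B replaces A's flat per-index loop (with % and // on every index) by staged block
-- construction: build the library block plus one decorated block per extra cycle (ceiling
-- division once), flatten, truncate (objective: alternative decomposition; same cost).

-- ===== PORT A =====
def TRACK_LIBRARY : List (List (String × String)) := [
  [("name", "landscape-overview"),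
   ("focus", "Map the space, define the topic clearly, and identify the main actors, categories, and terminology.")],
  [("name", "recent-developments"),
   ("focus", "Focus on recent launches, announcements, upgrades, funding, or major shifts tied to the topic.")],
  [("name", "primary-sources"),
   ("focus", "Prioritize official docs, company blogs, source repos, product pages, papers, or first-party statements.")],
  [("name", "benchmarks-and-data"),
   ("focus", "Look for quantitative evidence, evaluations, benchmarks, datasets, or measurable adoption signals.")],
  [("name", "open-source-ecosystem"),
   ("focus", "Investigate open-source projects, libraries, integrations, and implementation patterns around the topic.")],
  [("name", "real-world-adoption"),
   ("focus", "Find case studies, production usage reports, customer stories, or practitioner writeups.")],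
  [("name", "risks-and-limitations"),
   ("focus", "Surface failure modes, critiques, security issues, tradeoffs, limitations, or contested claims.")],
  [("name", "future-direction"),
   ("focus", "Look for roadmaps, open problems, strategic implications, and likely next-step developments.")],
  [("name", "competitive-landscape"),
   ("focus", "Compare notable vendors, products, approaches, or competing schools of thought.")],
  [("name", "regulation-and-governance"),
   ("focus", "Search for policy, compliance, regulatory, or governance angles where relevant.")],
  [("name", "academic-research"),
   ("focus", "Search for papers, technical reports, and research-oriented discussion around the topic.")],
  [("name", "community-signal"),
   ("focus", "Look for practitioner commentary, community experiments, or reported implementation experience.")]]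

-- A's dict literal {"name": f"{template['name']}-pass-{cycle+1}", "focus": template["focus"] + "…"};
-- template['k'] is first-match lookup (exact: the keys are always present in the concrete library)
def pvPassTrack (cycle : Int) (template : List (String × String)) : List (String × String) :=
  [("name", ((template.lookup "name").getD "") ++ "-pass-" ++ PySem.Int.toStr (cycle + 1)),
   ("focus", ((template.lookup "focus").getD "") ++ " Search for different sources and a different angle than earlier passes.")]

def build_research_tracks (parallel_researchers : Int) : List (List (String × String)) :=
  (PySem.List.pyRange 0 parallel_researchers 1).foldl (fun tracks index =>
    -- TRACK_LIBRARY[index % len(TRACK_LIBRARY)]: the index is always in range (IndexError impossible)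
    let template := (PySem.List.pyGet? TRACK_LIBRARY
        (PySem.Int.mod index (TRACK_LIBRARY.length : Int))).getD []
    let cycle := PySem.Int.floordiv index (TRACK_LIBRARY.length : Int)
    if cycle = 0 then tracks ++ [template]
    else tracks ++ [pvPassTrack cycle template]) []

-- ===== PORT B =====
def pvExtra : String := " Search for different sources and a different angle than earlier passes."

-- _decorated_cycle: dict comprehension over template.items(), by key
def pvDecoratedCycle (pass_number : Int) : List (List (String × String)) :=
  TRACK_LIBRARY.map (fun template =>
    template.map (fun kv =>
      if kv.1 = "focus" then (kv.1, kv.2 ++ pvExtra)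
      else (kv.1, kv.2 ++ "-pass-" ++ PySem.Int.toStr pass_number)))

def build_research_tracks_alt (parallel_researchers : Int) : List (List (String × String)) :=
  if parallel_researchers ≤ 0 then []
  else
    -- cycles = -(-parallel_researchers // len(TRACK_LIBRARY)), i.e. ceiling division
    let cycles := -(PySem.Int.floordiv (-parallel_researchers) (TRACK_LIBRARY.length : Int))
    let blocks := [TRACK_LIBRARY] ++ (PySem.List.pyRange 2 (cycles + 1) 1).map pvDecoratedCycle
    PySem.List.slice (blocks.flatMap (fun block => block)) none (some parallel_researchers)

-- ===== PRECONDITION & SPEC =====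
def Spec_build_research_tracks (parallel_researchers : Int) (out : List (List (String × String))) : Prop := out = build_research_tracks_alt parallel_researchers
instance (parallel_researchers : Int) (out : List (List (String × String))) : Decidable (Spec_build_research_tracks parallel_researchers out) := by unfold Spec_build_research_tracks; infer_instance

-- ===== CLAIM =====
def Claim_equal_build_research_tracks : Prop := ∀ (parallel_researchers : Int), Dom_build_research_tracks parallel_researchers → Spec_build_research_tracks parallel_researchers (build_research_tracks parallel_researchers)

-- ===== LEMMAS AND PROOFS =====

-- the entry appended for cycle c and a given template
def pvE (c : Int) (t : List (String × String)) : List (String × String) :=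
  if c = 0 then t else pvPassTrack c t

-- the entry both programs produce at absolute position j
def pvMk (j : Nat) : List (String × String) :=
  pvE ((j / 12 : Nat) : Int) (TRACK_LIBRARY.getD (j % 12) [])

theorem pv_A_eq (n : Int) :
    build_research_tracks n = (List.range n.toNat).map pvMk := by
  unfold build_research_tracks
  rw [PySem.List.pyRange_one]
  simp only [Int.sub_zero, List.foldl_map, zero_add]
  rw [show (List.range n.toNat).map pvMk =
        [] ++ (List.range n.toNat).map pvMk from rfl,
      ← PySem.List.foldl_append_singleton_eq_map]
  refine PySem.List.foldl_congr_mem _ _ _ _ ?_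
  intro acc k _
  have h12 : (TRACK_LIBRARY.length : Int) = ((12 : Nat) : Int) := rfl
  have hk : k % 12 < TRACK_LIBRARY.length := by
    have : TRACK_LIBRARY.length = 12 := rfl
    omega
  simp only [h12, PySem.Int.mod_natCast, PySem.Int.floordiv_natCast,
    PySem.List.pyGet?_natCast, List.getElem?_eq_getElem hk, Option.getD_some]
  unfold pvMk pvE
  rw [List.getD_eq_getElem _ _ hk]
  split <;> rfl

theorem pv_take_map_getD (xs : List (List (String × String)))
    (f : List (String × String) → List (String × String)) (m : Nat) (h : m ≤ xs.length) :
    (xs.take m).map f = (List.range m).map (fun j => f (xs.getD j [])) := by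
  apply List.ext_getElem
  · simp [h]
  · intro i h1 h2
    have hi : i < m := by simpa using h2
    have hix : i < xs.length := lt_of_lt_of_le hi h
    simp [List.getElem?_eq_getElem hix]

-- a decorated block is exactly A's pass construction applied to every template
theorem pv_decorated_eq (c : Int) :
    pvDecoratedCycle c = TRACK_LIBRARY.map (pvPassTrack (c - 1)) := by
  have h : c - 1 + 1 = c := by ring
  unfold pvDecoratedCycle pvPassTrack pvExtra TRACK_LIBRARY
  simp only [List.map_cons, List.map_nil, h]
  rfl

-- the flattened block list is the indexed sequence both programs enumerate
theorem pv_blocks (k : Nat) :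
    TRACK_LIBRARY ++ ((List.range k).map (fun i : Nat => pvDecoratedCycle ((i : Int) + 2))).flatten
      = (List.range (12 * (k + 1))).map pvMk := by
  induction k with
  | zero =>
      simp only [List.range_zero, List.map_nil, List.flatten_nil, List.append_nil]
      rw [show TRACK_LIBRARY = (TRACK_LIBRARY.take 12).map (fun t => t) from by
            rw [List.take_of_length_le (by decide), List.map_id'],
          pv_take_map_getD _ _ 12 (by decide)]
      apply List.map_congr_left
      intro j hj
      have hj' : j < 12 := List.mem_range.mp hj
      unfold pvMk pvE
      have hd : j / 12 = 0 := by omega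
      have hm : j % 12 = j := by omega
      rw [hd, hm]
      simp
  | succ k ih =>
      rw [List.range_succ, List.map_append, List.map_cons, List.map_nil,
        List.flatten_append, List.flatten_cons, List.flatten_nil, List.append_nil,
        ← List.append_assoc, ih,
        show 12 * (k + 1 + 1) = 12 * (k + 1) + 12 from by ring, List.range_add,
        List.map_append, List.map_map]
      congr 1
      rw [pv_decorated_eq,
        show TRACK_LIBRARY.map (pvPassTrack ((k : Int) + 2 - 1)) =
          (TRACK_LIBRARY.take 12).map (pvPassTrack ((k : Int) + 2 - 1)) from by
            rw [List.take_of_length_le (by decide)],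
        pv_take_map_getD _ _ 12 (by decide)]
      apply List.map_congr_left
      intro j hj
      have hj' : j < 12 := List.mem_range.mp hj
      simp only [Function.comp]
      unfold pvMk pvE
      have hd : (12 * (k + 1) + j) / 12 = k + 1 := by omega
      have hm : (12 * (k + 1) + j) % 12 = j := by omega
      rw [hd, hm, if_neg (by omega : ¬ ((k + 1 : Nat) : Int) = 0)]
      congr 1
      push_cast
      ring

theorem pv_B_eq (n : Int) :
    build_research_tracks_alt n = (List.range n.toNat).map pvMk := by
  by_cases hn : n ≤ 0
  · rw [build_research_tracks_alt, if_pos hn]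
    have : n.toNat = 0 := by omega
    simp [this]
  · obtain ⟨m, hmdef⟩ : ∃ m : Nat, m = (n.toNat + 11) / 12 := ⟨_, rfl⟩
    have hm1 : 1 ≤ m := by omega
    have hceil : -(PySem.Int.floordiv (-n) (TRACK_LIBRARY.length : Int)) = ((m : Nat) : Int) := by
      rw [show (TRACK_LIBRARY.length : Int) = 12 from rfl,
        PySem.Int.neg_floordiv_neg_eq_iff_of_pos (by omega)]
      exact ⟨by omega, by omega⟩
    rw [build_research_tracks_alt, if_neg hn]
    simp only [hceil]
    have hrange : PySem.List.pyRange 2 (((m : Nat) : Int) + 1) 1 =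
        (List.range (m - 1)).map (fun i : Nat => (2 : Int) + (i : Int)) := by
      rw [PySem.List.pyRange_one,
        show ((((m : Nat) : Int) + 1) - 2).toNat = m - 1 from by omega]
    rw [hrange, List.map_map]
    have hcomp : (pvDecoratedCycle ∘ fun i : Nat => (2 : Int) + (i : Int)) =
        (fun i : Nat => pvDecoratedCycle ((i : Int) + 2)) := by
      funext i
      simp only [Function.comp]
      congr 1
      ring
    rw [hcomp]
    have hflat : (([TRACK_LIBRARY] ++ (List.range (m - 1)).map
          (fun i : Nat => pvDecoratedCycle ((i : Int) + 2))).flatMap (fun block => block))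
        = (List.range (12 * m)).map pvMk := by
      rw [List.flatMap_def, List.map_id']
      rw [show [TRACK_LIBRARY] ++ (List.range (m - 1)).map
            (fun i : Nat => pvDecoratedCycle ((i : Int) + 2)) =
          TRACK_LIBRARY :: (List.range (m - 1)).map
            (fun i : Nat => pvDecoratedCycle ((i : Int) + 2)) from rfl,
        List.flatten_cons, pv_blocks (m - 1),
        show m - 1 + 1 = m from by omega]
    rw [hflat]
    rw [show n = ((n.toNat : Nat) : Int) from by omega, PySem.List.slice_to_natCast]
    have hmin : min n.toNat (12 * m) = n.toNat := by omega
    rw [← List.map_take, List.take_range, hmin, Int.toNat_natCast]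

-- ===== VERDICT =====
theorem build_research_tracks_spec : Claim_equal_build_research_tracks := by
  intro n _
  unfold Spec_build_research_tracks
  rw [pv_A_eq, pv_B_eq]
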